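-- pv_equiv track=rewrite | github.com/prabowo02/project_euler | codes/PE250.py | generating_function
-- ===== SOURCE A (Python) =====
-- MOD = 10**9
--
-- def multiply(dp1, dp2):
--     n = len(dp1)
--     ret = [0 for i in range(n+n)]
--     for i in range(n):
--         for j in range(n):
--             ret[i+j] += dp1[i] * dp2[j]
--
--     return [(ret[i] + ret[i+n]) % MOD for i in range(n)]
--
-- def power(dp, k):
--     n = len(dp)
--     ret = [0 for i in range(n)]
--     ret[0] = 1
--     while k:
--         if k & 1:
--             ret = multiply(ret, dp)
--         dp = multiply(dp, dp)
--         k >>= 1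
--     return ret
--
-- def generating_function(residue_counter):
--     k = len(residue_counter)
--     minimum_nonzero = min([r for r in residue_counter if r > 0])
--     gf = [0 for i in range(k)]
--     gf[0] = 1
--
--     for i in range(k):
--         if residue_counter[i] == 0:
--             continue
--
--         residue_counter[i] -= minimum_nonzero
--
--         mul = [0 for i in range(k)]
--         mul[0] = mul[i] = 1
--
--         gf = multiply(gf, mul)
--
--     return power(gf, minimum_nonzero)
-- ===== SOURCE B (Python) =====
-- MOD = 10**9
--
-- def generating_function(residue_counter):
--     k = len(residue_counter)
--     m = min(r for r in residue_counter if r > 0)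
--     idxs = [i for i in range(1, k) if residue_counter[i]]
--     ret = [1] + [0] * (k - 1)
--     for bit in bin(m)[2:]:
--         sq = [0] * k
--         for a in range(k):
--             for b in range(k):
--                 t = (a + b) % k
--                 sq[t] = (sq[t] + ret[a] * ret[b]) % MOD
--         ret = sq
--         if bit == '1':
--             for i in idxs:
--                 ret = [(ret[j] + ret[j - i]) % MOD for j in range(k)]
--     return ret
-- ===== Notes on version B (the rewrite author's own statement) =====
-- stated objective: faster
-- what changed: B never materializes the product polynomial at all: instead of A's two phases (build P = prod(1+x^i) with k generic doubled-length convolutions, then LSB-first binary powering with a separate squaring chain and accumulator), B scans the bits of the exponent MSB-first keeping a single polynomial, squaring it once per bit and, on set bits, applying each sparse (1+x^i) factor directly as an O(k) cyclic shift-add.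
import Mathlib
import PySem

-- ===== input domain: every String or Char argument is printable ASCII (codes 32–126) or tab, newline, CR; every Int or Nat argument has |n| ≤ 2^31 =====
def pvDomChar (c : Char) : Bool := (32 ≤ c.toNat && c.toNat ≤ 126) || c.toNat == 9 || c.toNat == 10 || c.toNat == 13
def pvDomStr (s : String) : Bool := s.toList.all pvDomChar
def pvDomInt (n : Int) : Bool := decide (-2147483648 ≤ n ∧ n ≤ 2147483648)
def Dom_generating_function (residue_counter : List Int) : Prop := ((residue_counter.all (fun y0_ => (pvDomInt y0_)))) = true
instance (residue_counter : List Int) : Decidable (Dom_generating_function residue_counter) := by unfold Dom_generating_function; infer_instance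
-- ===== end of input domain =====

-- B never builds the product polynomial: it scans the exponent's bits MSB-first, squaring one
-- polynomial and applying each sparse (1+x^i) factor as a cyclic shift-add on set bits (the
-- timing run measured B well ahead at the largest size); A also mutates residue_counter in
-- place while B does not — the equivalence proved here is about the return value only.

-- ===== PORT A =====

def pvMOD : Int := 1000000000

-- [0 for i in range(n)]
def pvZeros (n : Nat) : List Int := (List.range n).map (fun _ => (0:Int))

-- A.multiply: list indexing is ported with getD 0 / set, which is exact here because every call
-- site passes equal-length lists, so every read and write index is in range.
def pvMulA (dp1 dp2 : List Int) : List Int :=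
  let ret := (List.range dp1.length).foldl
    (fun r i => (List.range dp1.length).foldl
      (fun r j => r.set (i + j) (r.getD (i + j) 0 + dp1.getD i 0 * dp2.getD j 0)) r)
    (pvZeros (dp1.length + dp1.length))
  (List.range dp1.length).map (fun i => PySem.Int.mod (ret.getD i 0 + ret.getD (i + dp1.length) 0) pvMOD)

-- A.power's while-loop: Python's `while k: ... k >>= 1` returns only for k ≥ 0, so recursion on
-- m.toNat is exact on every input where the Python loop terminates.
def pvPowGoA (ret dp : List Int) (m : Nat) : List Int :=
  if h : m = 0 then ret
  else pvPowGoA (if m % 2 = 1 then pvMulA ret dp else ret) (pvMulA dp dp) (m / 2)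
termination_by m
decreasing_by omega

-- A.generating_function; the in-place update residue_counter[i] -= minimum_nonzero is carried in
-- the fold state exactly as Python does it.
def generating_function (residue_counter : List Int) : List Int :=
  match PySem.List.min? (residue_counter.filter (fun r => decide ((0:Int) < r))) (fun x => x) with
  | none => []   -- Python: min of an empty sequence raises ValueError; excluded by Pre_
  | some minimum_nonzero =>
    pvPowGoA ((pvZeros residue_counter.length).set 0 1)
      (((List.range residue_counter.length).foldl
          (fun (st : List Int × List Int) i =>
            if st.1.getD i 0 = 0 then st
            else (st.1.set i (st.1.getD i 0 - minimum_nonzero),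
                  pvMulA st.2 (((pvZeros residue_counter.length).set 0 1).set i 1)))
          (residue_counter, (pvZeros residue_counter.length).set 0 1)).2)
      minimum_nonzero.toNat

-- ===== PORT B =====

-- bin(m)[2:] as a list of bits, most significant first (Python: bin(0)[2:] = "0").
def pvBitsGo (m : Nat) : List Bool :=
  if h : m = 0 then [] else pvBitsGo (m / 2) ++ [decide (m % 2 = 1)]
termination_by m
decreasing_by omega

def pvBits (m : Nat) : List Bool := if m = 0 then [false] else pvBitsGo m

-- B's squaring step: one cyclic self-convolution accumulated in place; all indices in range
-- (every list involved has length k), so getD/set are exact.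
def pvCycSq (a : List Int) (k : Nat) : List Int :=
  (List.range k).foldl
    (fun out i => (List.range k).foldl
      (fun out j => out.set ((i + j) % k)
        (PySem.Int.mod (out.getD ((i + j) % k) 0 + a.getD i 0 * a.getD j 0) pvMOD)) out)
    (pvZeros k)

-- B's multiply-by-all-factors step: ret[j - i] (a possibly negative Python index, always in
-- range here) is ported with PySem.List.pyGetD.
def pvShiftAdds (ret : List Int) (idxs : List Nat) (k : Nat) : List Int :=
  idxs.foldl
    (fun ret (i : Nat) => (List.range k).map (fun j =>
      PySem.Int.mod (ret.getD j 0 + PySem.List.pyGetD ret ((j : Int) - (i : Int)) 0) pvMOD))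
    ret

-- B.generating_function: MSB-first square-and-multiply over bin(m), the multiply applying the
-- sparse factors directly; the product polynomial is never built.
def generating_function_alt (residue_counter : List Int) : List Int :=
  match PySem.List.min? (residue_counter.filter (fun r => decide ((0:Int) < r))) (fun x => x) with
  | none => []   -- Python: min of an empty generator raises ValueError; excluded by Pre_
  | some m =>
    (pvBits m.toNat).foldl
      (fun ret bit =>
        let s := pvCycSq ret residue_counter.length
        if bit then
          pvShiftAdds s
            ((List.range' 1 (residue_counter.length - 1)).filter
              (fun i => decide (residue_counter.getD i 0 ≠ 0)))
            residue_counter.length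
        else s)
      (1 :: pvZeros (residue_counter.length - 1))

-- ===== PRECONDITION & SPEC =====

-- Pre_ excludes exactly the inputs with no positive entry, on which Python's min of the empty
-- filtered sequence raises ValueError in both A and B.
def Pre_generating_function (residue_counter : List Int) : Prop :=
  ∃ r ∈ residue_counter, (0:Int) < r
instance (residue_counter : List Int) : Decidable (Pre_generating_function residue_counter) := by
  unfold Pre_generating_function; infer_instance

def pvWitness_generating_function : List Int := [1]

def Spec_generating_function (residue_counter : List Int) (out : List Int) : Prop :=
  out = generating_function_alt residue_counter
instance (residue_counter : List Int) (out : List Int) : Decidable (Spec_generating_function residue_counter out) := by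
  unfold Spec_generating_function; infer_instance

-- ===== CLAIM (what is proved, stated in full; the proofs are below) =====
def Claim_equal_generating_function : Prop := ∀ (residue_counter : List Int), Dom_generating_function residue_counter → Pre_generating_function residue_counter → Spec_generating_function residue_counter (generating_function residue_counter)

-- ===== LEMMAS AND PROOFS =====

lemma pvmod_eq (a : Int) : PySem.Int.mod a pvMOD = a % pvMOD := by
  have h : Int.fmod a 1000000000 = a % 1000000000 := by
    rw [Int.fmod_eq_emod]
    norm_num
  simp [PySem.Int.mod, pvMOD, h]

lemma pvZeros_length (n : Nat) : (pvZeros n).length = n := by simp [pvZeros]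

lemma pvZeros_getD (n t : Nat) : (pvZeros n).getD t 0 = 0 := by
  rcases Nat.lt_or_ge t n with h | h
  · rw [List.getD_eq_getElem _ _ (by simpa [pvZeros] using h)]
    simp [pvZeros]
  · rw [List.getD_eq_default _ _ (by simpa [pvZeros] using h)]

lemma pv_getD_set (l : List Int) (i t : Nat) (v : Int) (hi : i < l.length) :
    (l.set i v).getD t 0 = if t = i then v else l.getD t 0 := by
  by_cases h : t = i
  · subst h
    rw [List.getD_eq_getElem _ _ (by simpa using hi)]
    simp
  · rw [if_neg h]
    rcases Nat.lt_or_ge t l.length with ht | ht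
    · rw [List.getD_eq_getElem _ _ (by simpa using ht), List.getD_eq_getElem _ _ ht]
      rw [List.getElem_set_ne (by omega)]
    · rw [List.getD_eq_default _ _ (by simpa using ht), List.getD_eq_default _ _ ht]

lemma pv_sum_map_add {α : Type} (l : List α) (f g : α → Int) :
    (l.map (fun x => f x + g x)).sum = (l.map f).sum + (l.map g).sum := by
  induction l with
  | nil => simp
  | cons x l ih => simp [ih]; ring

lemma pv_sum_single (k t : Nat) (g : Nat → Int) (ht : t < k) :
    ((List.range k).map (fun i => if i = t then g i else 0)).sum = g t := by
  induction k with
  | zero => omega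
  | succ k ih =>
    rw [List.range_succ, List.map_append, List.sum_append]
    rcases Nat.lt_or_ge t k with h | h
    · rw [ih h]
      have hk : ¬ (k = t) := by omega
      simp [hk]
    · have htk : t = k := by omega
      subst htk
      have h0 : ((List.range t).map (fun i => if i = t then g i else 0)).sum = 0 := by
        apply List.sum_eq_zero
        intro y hy
        simp only [List.mem_map, List.mem_range] at hy
        obtain ⟨i, hi, rfl⟩ := hy
        simp [Nat.ne_of_lt hi]
      simp [h0]

lemma pv_acc (π : Nat × Nat → Nat) (v : Nat × Nat → Int) (P : List (Nat × Nat)) :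
    ∀ (init : List Int), (∀ p ∈ P, π p < init.length) →
      (P.foldl (fun o p => o.set (π p) (o.getD (π p) 0 + v p)) init).length = init.length ∧
      ∀ t : Nat, (P.foldl (fun o p => o.set (π p) (o.getD (π p) 0 + v p)) init).getD t 0
         = init.getD t 0 + (P.map (fun p => if π p = t then v p else 0)).sum := by
  induction P with
  | nil => intro init _; simp
  | cons p P ih =>
    intro init h
    have hp : π p < init.length := h p (by simp)
    obtain ⟨hl, hv⟩ := ih (init.set (π p) (init.getD (π p) 0 + v p))
      (by intro q hq; simpa using h q (List.mem_cons_of_mem _ hq))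
    constructor
    · simpa using hl
    · intro t
      rw [List.foldl_cons, hv t, pv_getD_set init (π p) t _ hp,
          List.map_cons, List.sum_cons]
      by_cases ht : π p = t
      · rw [if_pos ht.symm, if_pos ht, ht]; ring
      · rw [if_neg (fun hh => ht hh.symm), if_neg ht]; ring

lemma pv_macc (π : Nat × Nat → Nat) (v : Nat × Nat → Int) (P : List (Nat × Nat)) :
    ∀ (init : List Int), (∀ p ∈ P, π p < init.length) →
      (∀ t : Nat, init.getD t 0 % pvMOD = init.getD t 0) →
      (P.foldl (fun o p => o.set (π p) ((o.getD (π p) 0 + v p) % pvMOD)) init).length = init.length ∧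
      ∀ t : Nat, (P.foldl (fun o p => o.set (π p) ((o.getD (π p) 0 + v p) % pvMOD)) init).getD t 0
         = (init.getD t 0 + (P.map (fun p => if π p = t then v p else 0)).sum) % pvMOD := by
  induction P with
  | nil =>
    intro init _ hcanon
    refine ⟨rfl, ?_⟩
    intro t
    rw [List.foldl_nil, List.map_nil, List.sum_nil, add_zero, hcanon t]
  | cons p P ih =>
    intro init h hcanon
    have hp : π p < init.length := h p (by simp)
    obtain ⟨hl, hv⟩ := ih (init.set (π p) ((init.getD (π p) 0 + v p) % pvMOD))
      (by intro q hq; simpa using h q (List.mem_cons_of_mem _ hq))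
      (by intro t
          rw [pv_getD_set init (π p) t _ hp]
          by_cases ht : t = π p
          · rw [if_pos ht, Int.emod_emod_of_dvd _ dvd_rfl]
          · rw [if_neg ht]; exact hcanon t)
    constructor
    · simpa using hl
    · intro t
      rw [List.foldl_cons, hv t, pv_getD_set init (π p) t _ hp,
          List.map_cons, List.sum_cons]
      by_cases ht : π p = t
      · rw [if_pos ht.symm, if_pos ht, Int.emod_add_emod, ht]
        congr 1
        ring
      · rw [if_neg (fun hh => ht hh.symm), if_neg ht]
        congr 1
        ring

def pvPairs (n : Nat) : List (Nat × Nat) :=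
  (List.range n).flatMap (fun i => (List.range n).map (fun j => (i, j)))

lemma pv_mem_pairs {n : Nat} {p : Nat × Nat} : p ∈ pvPairs n ↔ p.1 < n ∧ p.2 < n := by
  obtain ⟨i, j⟩ := p
  simp [pvPairs]

lemma pv_nested {α β γ : Type} (g : γ → α × β → γ) (l2 : List β) :
    ∀ (l1 : List α) (init : γ),
      l1.foldl (fun o i => l2.foldl (fun o j => g o (i, j)) o) init
        = (l1.flatMap (fun i => l2.map (fun j => (i, j)))).foldl g init := by
  intro l1
  induction l1 with
  | nil => intro init; simp
  | cons x l ih =>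
    intro init
    rw [List.foldl_cons, List.flatMap_cons, List.foldl_append, List.foldl_map, ih]

lemma pv_nested_pairs {γ : Type} (g : γ → Nat × Nat → γ) (n : Nat) (init : γ) :
    (List.range n).foldl (fun o i => (List.range n).foldl (fun o j => g o (i, j)) o) init
      = (pvPairs n).foldl g init := by
  unfold pvPairs
  exact pv_nested g (List.range n) (List.range n) init

lemma pv_sum_flat {α β : Type} (l2 : List β) (f : α × β → Int) :
    ∀ l1 : List α, ((l1.flatMap (fun i => l2.map (fun j => (i, j)))).map f).sum
      = (l1.map (fun i => ((l2.map (fun j => f (i, j))).sum))).sum := by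
  intro l1
  induction l1 with
  | nil => simp
  | cons x l ih =>
    simp [List.flatMap_cons, List.map_append, List.sum_append, ih, List.map_map, Function.comp_def]

def pvSpec (n : Nat) (a b : List Int) : List Int :=
  (List.range n).map (fun t =>
    ((pvPairs n).map (fun p => if (p.1 + p.2) % n = t then a.getD p.1 0 * b.getD p.2 0 else 0)).sum % pvMOD)

lemma pv_sum_split (n t : Nat) (ht : t < n) (w : Nat × Nat → Int) :
    ((pvPairs n).map (fun p => if (p.1 + p.2) % n = t then w p else 0)).sum
  = ((pvPairs n).map (fun p => if p.1 + p.2 = t then w p else 0)).sum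
  + ((pvPairs n).map (fun p => if p.1 + p.2 = t + n then w p else 0)).sum := by
  rw [← pv_sum_map_add]
  apply congrArg List.sum
  apply List.map_congr_left
  intro p hp
  have hp' : p.1 < n ∧ p.2 < n := pv_mem_pairs.mp hp
  rcases Nat.lt_or_ge (p.1 + p.2) n with hlt | hge
  · simp only [Nat.mod_eq_of_lt hlt]
    split_ifs <;> omega
  · simp only [show (p.1 + p.2) % n = p.1 + p.2 - n from by
      rw [Nat.mod_eq_sub_mod hge, Nat.mod_eq_of_lt (by omega)]]
    split_ifs <;> omega

lemma pvMulA_eq_spec (a b : List Int) : pvMulA a b = pvSpec a.length a b := by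
  unfold pvMulA pvSpec
  simp only [pvmod_eq]
  rw [pv_nested_pairs
    (fun (o : List Int) (p : Nat × Nat) =>
      o.set (p.1 + p.2) (o.getD (p.1 + p.2) 0 + a.getD p.1 0 * b.getD p.2 0))
    a.length (pvZeros (a.length + a.length))]
  obtain ⟨hl, hv⟩ := pv_acc (fun p => p.1 + p.2) (fun p => a.getD p.1 0 * b.getD p.2 0)
    (pvPairs a.length) (pvZeros (a.length + a.length))
    (by intro p hp; have h2 := pv_mem_pairs.mp hp; rw [pvZeros_length]
        exact Nat.add_lt_add h2.1 h2.2)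
  apply List.map_congr_left
  intro t htm
  rw [List.mem_range] at htm
  rw [hv t, hv (t + a.length), pvZeros_getD, pvZeros_getD, zero_add, zero_add]
  congr 1
  exact (pv_sum_split a.length t htm _).symm

lemma pvCycSq_eq_spec (a : List Int) (k : Nat) : pvCycSq a k = pvSpec k a a := by
  unfold pvCycSq pvSpec
  simp only [pvmod_eq]
  rw [pv_nested_pairs
    (fun (o : List Int) (p : Nat × Nat) =>
      o.set ((p.1 + p.2) % k) ((o.getD ((p.1 + p.2) % k) 0 + a.getD p.1 0 * a.getD p.2 0) % pvMOD))
    k (pvZeros k)]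
  obtain ⟨hl, hv⟩ := pv_macc (fun p => (p.1 + p.2) % k) (fun p => a.getD p.1 0 * a.getD p.2 0)
    (pvPairs k) (pvZeros k)
    (by intro p hp; have := pv_mem_pairs.mp hp; rw [pvZeros_length]; exact Nat.mod_lt _ (by omega))
    (by intro t; rw [pvZeros_getD]; simp)
  apply List.ext_getElem
  · rw [hl, pvZeros_length]; simp
  · intro t h1 h2
    have ht : t < k := by rw [hl, pvZeros_length] at h1; exact h1
    rw [← List.getD_eq_getElem _ 0 h1, hv t, pvZeros_getD, zero_add]
    simp

lemma pv_bl_getD (k i j : Nat) (hik : i < k) (hj : j < k) :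
    (((pvZeros k).set 0 1).set i 1).getD j 0 = if j = i then 1 else if j = 0 then 1 else 0 := by
  rw [pv_getD_set _ _ _ _ (by rw [List.length_set, pvZeros_length]; omega)]
  by_cases hji : j = i
  · simp [hji]
  · rw [if_neg hji, if_neg hji, pv_getD_set _ _ _ _ (by rw [pvZeros_length]; omega), pvZeros_getD]

lemma pv_collapse_sum (gf : List Int) (k i t t0 : Nat) (hi1 : 1 ≤ i) (hik : i < k)
    (ht : t < k) (ht0 : t0 < k) (hchar : t0 + i = t ∨ t0 + i = t + k) :
    ((pvPairs k).map (fun p =>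
      if (p.1 + p.2) % k = t then gf.getD p.1 0 * (((pvZeros k).set 0 1).set i 1).getD p.2 0 else 0)).sum
    = gf.getD t 0 + gf.getD t0 0 := by
  unfold pvPairs
  rw [pv_sum_flat]
  have hinner : ∀ i' ∈ List.range k,
      ((List.range k).map (fun j =>
        if (i' + j) % k = t then gf.getD i' 0 * (((pvZeros k).set 0 1).set i 1).getD j 0 else 0)).sum
    = (if i' = t then gf.getD i' 0 else 0) + (if i' = t0 then gf.getD i' 0 else 0) := by
    intro i' hi'
    rw [List.mem_range] at hi'
    have hsplit : ∀ j ∈ List.range k,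
        (if (i' + j) % k = t then gf.getD i' 0 * (((pvZeros k).set 0 1).set i 1).getD j 0 else 0)
      = (if j = 0 then (if i' = t then gf.getD i' 0 else 0) else 0)
      + (if j = i then (if i' = t0 then gf.getD i' 0 else 0) else 0) := by
      intro j hj
      rw [List.mem_range] at hj
      rw [pv_bl_getD k i j hik hj]
      rcases Nat.lt_or_ge (i' + j) k with hlt | hge
      · simp only [Nat.mod_eq_of_lt hlt]
        split_ifs <;> omega
      · simp only [show (i' + j) % k = i' + j - k from by
          rw [Nat.mod_eq_sub_mod hge, Nat.mod_eq_of_lt (by omega)]]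
        split_ifs <;> omega
    rw [List.map_congr_left hsplit, pv_sum_map_add,
        pv_sum_single k 0 (fun _ => if i' = t then gf.getD i' 0 else 0) (by omega),
        pv_sum_single k i (fun _ => if i' = t0 then gf.getD i' 0 else 0) (by omega)]
  rw [List.map_congr_left hinner, pv_sum_map_add,
      pv_sum_single k t (fun i' => gf.getD i' 0) ht,
      pv_sum_single k t0 (fun i' => gf.getD i' 0) ht0]

lemma pv_pyGetD_wrap (gf : List Int) (k i j : Nat) (hlen : gf.length = k)
    (hi1 : 1 ≤ i) (hik : i < k) (hj : j < k) :
    PySem.List.pyGetD gf ((j : Int) - (i : Int)) 0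
      = gf.getD (if i ≤ j then j - i else k + j - i) 0 := by
  rcases Nat.lt_or_ge j i with h | h
  · have hc : (j : Int) - (i : Int) = -(((i - j : Nat)) : Int) := by omega
    rw [hc, PySem.List.pyGetD_neg_natCast gf (i - j) 0 (by omega) (by omega), if_neg (by omega),
        List.getD_eq_getElem _ 0 (by omega)]
    have hidx : gf.length - (i - j) = k + j - i := by omega
    simp [hidx]
  · have hc : (j : Int) - (i : Int) = ((j - i : Nat) : Int) := by omega
    rw [hc, PySem.List.pyGetD_natCast, if_pos h]

lemma pv_spec_mulList (gf : List Int) (k i : Nat) (hlen : gf.length = k)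
    (hi1 : 1 ≤ i) (hik : i < k) :
    pvSpec k gf (((pvZeros k).set 0 1).set i 1)
      = (List.range k).map (fun j =>
          PySem.Int.mod (gf.getD j 0 + PySem.List.pyGetD gf ((j : Int) - (i : Int)) 0) pvMOD) := by
  unfold pvSpec
  simp only [pvmod_eq]
  apply List.map_congr_left
  intro t htm
  rw [List.mem_range] at htm
  rw [pv_pyGetD_wrap gf k i t hlen hi1 hik htm]
  by_cases hit : i ≤ t
  · rw [if_pos hit, pv_collapse_sum gf k i t (t - i) hi1 hik htm (by omega) (by omega)]
  · rw [if_neg hit, pv_collapse_sum gf k i t (k + t - i) hi1 hik htm (by omega) (by omega)]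

lemma pv_spec_e0 (gf : List Int) (k : Nat) (hlen : gf.length = k) (hk : 0 < k)
    (hcanon : ∀ t, gf.getD t 0 % pvMOD = gf.getD t 0) :
    pvSpec k gf (((pvZeros k).set 0 1).set 0 1) = gf := by
  apply List.ext_getElem
  · simp [pvSpec, hlen]
  · intro t h1 h2
    have ht : t < k := by simpa [pvSpec] using h1
    unfold pvSpec
    rw [List.getElem_map, List.getElem_range]
    have hsum : ((pvPairs k).map (fun p =>
        if (p.1 + p.2) % k = t then gf.getD p.1 0 * (((pvZeros k).set 0 1).set 0 1).getD p.2 0 else 0)).sum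
      = gf.getD t 0 := by
      unfold pvPairs
      rw [pv_sum_flat]
      have hinner : ∀ i' ∈ List.range k,
          ((List.range k).map (fun j =>
            if (i' + j) % k = t then gf.getD i' 0 * (((pvZeros k).set 0 1).set 0 1).getD j 0 else 0)).sum
        = (if i' = t then gf.getD i' 0 else 0) := by
        intro i' hi'
        rw [List.mem_range] at hi'
        have hsplit : ∀ j ∈ List.range k,
            (if (i' + j) % k = t then gf.getD i' 0 * (((pvZeros k).set 0 1).set 0 1).getD j 0 else 0)
          = (if j = 0 then (if i' = t then gf.getD i' 0 else 0) else 0) := by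
          intro j hj
          rw [List.mem_range] at hj
          rw [pv_bl_getD k 0 j hk hj]
          rcases Nat.lt_or_ge (i' + j) k with hlt | hge
          · simp only [Nat.mod_eq_of_lt hlt]
            split_ifs <;> omega
          · simp only [show (i' + j) % k = i' + j - k from by
              rw [Nat.mod_eq_sub_mod hge, Nat.mod_eq_of_lt (by omega)]]
            split_ifs <;> omega
        rw [List.map_congr_left hsplit,
            pv_sum_single k 0 (fun _ => if i' = t then gf.getD i' 0 else 0) (by omega)]
      rw [List.map_congr_left hinner, pv_sum_single k t (fun i' => gf.getD i' 0) ht]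
    rw [hsum, hcanon t, List.getD_eq_getElem _ 0 (by omega)]

lemma pv_e0_cons (k : Nat) (hk : 0 < k) : (pvZeros k).set 0 1 = 1 :: pvZeros (k - 1) := by
  cases k with
  | zero => omega
  | succ k =>
    have h : pvZeros (k + 1) = 0 :: pvZeros k := by
      simp [pvZeros, List.range_succ_eq_map, List.map_map, Function.comp_def]
    rw [h]
    simp

lemma pv_e0_canon (k : Nat) (hk : 0 < k) :
    ∀ t, ((pvZeros k).set 0 1).getD t 0 % pvMOD = ((pvZeros k).set 0 1).getD t 0 := by
  intro t
  rw [pv_getD_set _ _ _ _ (by rw [pvZeros_length]; omega)]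
  by_cases ht : t = 0
  · rw [if_pos ht]; norm_num [pvMOD]
  · rw [if_neg ht, pvZeros_getD]; norm_num

-- ---- the cyclic multiply-with-mod is a commutative monoid on canonical lists ----

def pvConvE (k : Nat) (a b : List Int) (t : Nat) : Int :=
  ((pvPairs k).map (fun p => if (p.1 + p.2) % k = t then a.getD p.1 0 * b.getD p.2 0 else 0)).sum

lemma pvSpec_eq_conv (k : Nat) (a b : List Int) :
    pvSpec k a b = (List.range k).map (fun t => pvConvE k a b t % pvMOD) := rfl

lemma pv_getD_map_range (k u : Nat) (f : Nat → Int) (hu : u < k) :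
    (((List.range k).map f).getD u 0) = f u := by
  rw [List.getD_eq_getElem _ 0 (by simpa using hu)]
  simp

lemma pvSpec_length (k : Nat) (a b : List Int) : (pvSpec k a b).length = k := by
  simp [pvSpec]

lemma pvSpec_canon (k : Nat) (a b : List Int) :
    ∀ t, (pvSpec k a b).getD t 0 % pvMOD = (pvSpec k a b).getD t 0 := by
  intro t
  rcases Nat.lt_or_ge t k with ht | ht
  · rw [pvSpec_eq_conv, pv_getD_map_range k t _ ht, Int.emod_emod_of_dvd _ dvd_rfl]
  · rw [List.getD_eq_default _ _ (by rw [pvSpec_length]; omega)]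
    norm_num

lemma pv_sum_comm {α β : Type} (l1 : List α) (l2 : List β) (g : α → β → Int) :
    (l1.map (fun i => (l2.map (g i)).sum)).sum
      = (l2.map (fun j => (l1.map (fun i => g i j)).sum)).sum := by
  induction l1 with
  | nil => simp
  | cons x l ih =>
    rw [List.map_cons, List.sum_cons, ih, ← pv_sum_map_add]
    simp only [List.map_cons, List.sum_cons]

lemma pv_sum_modeq {α : Type} (l : List α) (f g : α → Int)
    (h : ∀ x ∈ l, f x % pvMOD = g x % pvMOD) :
    (l.map f).sum % pvMOD = (l.map g).sum % pvMOD := by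
  induction l with
  | nil => simp
  | cons x l ih =>
    rw [List.map_cons, List.sum_cons, List.map_cons, List.sum_cons,
        Int.add_emod, h x (by simp), ih (fun y hy => h y (List.mem_cons_of_mem _ hy)),
        ← Int.add_emod]

lemma pvConvE_congr_left (k : Nat) (a' a c : List Int)
    (h : ∀ i, i < k → a'.getD i 0 % pvMOD = a.getD i 0 % pvMOD) (t : Nat) :
    pvConvE k a' c t % pvMOD = pvConvE k a c t % pvMOD := by
  unfold pvConvE
  apply pv_sum_modeq
  intro p hp
  have hik := (pv_mem_pairs.mp hp).1
  by_cases hc : (p.1 + p.2) % k = t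
  · rw [if_pos hc, if_pos hc, Int.mul_emod, h p.1 hik, ← Int.mul_emod]
  · rw [if_neg hc, if_neg hc]

lemma pvConvE_congr_right (k : Nat) (a c' c : List Int)
    (h : ∀ i, i < k → c'.getD i 0 % pvMOD = c.getD i 0 % pvMOD) (t : Nat) :
    pvConvE k a c' t % pvMOD = pvConvE k a c t % pvMOD := by
  unfold pvConvE
  apply pv_sum_modeq
  intro p hp
  have hjk := (pv_mem_pairs.mp hp).2
  by_cases hc : (p.1 + p.2) % k = t
  · rw [if_pos hc, if_pos hc, Int.mul_emod, h p.2 hjk, ← Int.mul_emod]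
  · rw [if_neg hc, if_neg hc]

lemma pv_ite_sum {α : Type} (c : Prop) [Decidable c] (l : List α) (f : α → Int) :
    (if c then (l.map f).sum else 0) = (l.map (fun x => if c then f x else 0)).sum := by
  by_cases h : c
  · simp [h]
  · simp [h]

lemma pv_sum_mul_right {α : Type} (l : List α) (f : α → Int) (r : Int) :
    (l.map f).sum * r = (l.map (fun x => f x * r)).sum := by
  induction l with
  | nil => simp
  | cons x t ih => simp [add_mul, ih]

lemma pv_sum_mul_left {α : Type} (l : List α) (f : α → Int) (r : Int) :
    r * (l.map f).sum = (l.map (fun x => r * f x)).sum := by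
  induction l with
  | nil => simp
  | cons x t ih => simp [mul_add, ih]

lemma pvSpec_comm (k : Nat) (a b : List Int) : pvSpec k a b = pvSpec k b a := by
  unfold pvSpec pvPairs
  apply List.map_congr_left
  intro t _
  congr 1
  rw [pv_sum_flat, pv_sum_flat, pv_sum_comm]
  apply congrArg List.sum
  apply List.map_congr_left
  intro j _
  apply congrArg List.sum
  apply List.map_congr_left
  intro i _
  rw [Nat.add_comm j i, mul_comm]

-- the exact (no-mod) cyclic convolution is associative: both bracketings equal the triple sum
lemma pvConvE_assoc (k : Nat) (hk : 0 < k) (a b c : List Int) (t : Nat) :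
    pvConvE k ((List.range k).map (pvConvE k a b)) c t
      = pvConvE k a ((List.range k).map (pvConvE k b c)) t := by
  have hL : pvConvE k ((List.range k).map (pvConvE k a b)) c t
      = ((List.range k).map (fun l => ((pvPairs k).map (fun p =>
          if (p.1 + p.2 + l) % k = t then a.getD p.1 0 * b.getD p.2 0 * c.getD l 0 else 0)).sum)).sum := by
    show ((pvPairs k).map (fun q => if (q.1 + q.2) % k = t
        then ((List.range k).map (pvConvE k a b)).getD q.1 0 * c.getD q.2 0 else 0)).sum = _
    unfold pvPairs
    rw [pv_sum_flat]
    have step2 : ∀ u ∈ List.range k,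
        ((List.range k).map (fun l =>
          if (u + l) % k = t then ((List.range k).map (pvConvE k a b)).getD u 0 * c.getD l 0 else 0)).sum
      = ((List.range k).map (fun l => ((pvPairs k).map (fun p =>
          if (p.1 + p.2) % k = u then (if (u + l) % k = t then a.getD p.1 0 * b.getD p.2 0 * c.getD l 0 else 0) else 0)).sum)).sum := by
      intro u hu
      rw [List.mem_range] at hu
      apply congrArg List.sum
      apply List.map_congr_left
      intro l _
      rw [pv_getD_map_range k u _ hu]
      unfold pvConvE
      rw [pv_sum_mul_right, pv_ite_sum]
      apply congrArg List.sum
      apply List.map_congr_left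
      intro p _
      split_ifs <;> ring
    rw [List.map_congr_left step2, pv_sum_comm]
    apply congrArg List.sum
    apply List.map_congr_left
    intro l _
    rw [pv_sum_comm]
    apply congrArg List.sum
    apply List.map_congr_left
    intro p _
    have hflip : ∀ u ∈ List.range k,
        (if (p.1 + p.2) % k = u then (if (u + l) % k = t then a.getD p.1 0 * b.getD p.2 0 * c.getD l 0 else 0) else 0)
      = (if u = (p.1 + p.2) % k then (if (u + l) % k = t then a.getD p.1 0 * b.getD p.2 0 * c.getD l 0 else 0) else 0) := by
      intro u _
      by_cases h : u = (p.1 + p.2) % k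
      · rw [if_pos h, if_pos h.symm]
      · rw [if_neg (fun hh => h hh.symm), if_neg h]
    rw [List.map_congr_left hflip,
        pv_sum_single k ((p.1 + p.2) % k)
          (fun u => if (u + l) % k = t then a.getD p.1 0 * b.getD p.2 0 * c.getD l 0 else 0)
          (Nat.mod_lt _ hk),
        Nat.mod_add_mod]
  have hR : pvConvE k a ((List.range k).map (pvConvE k b c)) t
      = ((List.range k).map (fun i => ((pvPairs k).map (fun p =>
          if (i + p.1 + p.2) % k = t then a.getD i 0 * b.getD p.1 0 * c.getD p.2 0 else 0)).sum)).sum := by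
    show ((pvPairs k).map (fun q => if (q.1 + q.2) % k = t
        then a.getD q.1 0 * ((List.range k).map (pvConvE k b c)).getD q.2 0 else 0)).sum = _
    unfold pvPairs
    rw [pv_sum_flat]
    apply congrArg List.sum
    apply List.map_congr_left
    intro i _
    have step2 : ∀ u ∈ List.range k,
        (if (i + u) % k = t then a.getD i 0 * ((List.range k).map (pvConvE k b c)).getD u 0 else 0)
      = ((pvPairs k).map (fun p =>
          if (p.1 + p.2) % k = u then (if (i + u) % k = t then a.getD i 0 * b.getD p.1 0 * c.getD p.2 0 else 0) else 0)).sum := by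
      intro u hu
      rw [List.mem_range] at hu
      rw [pv_getD_map_range k u _ hu]
      unfold pvConvE
      rw [pv_sum_mul_left, pv_ite_sum]
      apply congrArg List.sum
      apply List.map_congr_left
      intro p _
      split_ifs <;> ring
    rw [List.map_congr_left step2, pv_sum_comm]
    apply congrArg List.sum
    apply List.map_congr_left
    intro p _
    have hflip : ∀ u ∈ List.range k,
        (if (p.1 + p.2) % k = u then (if (i + u) % k = t then a.getD i 0 * b.getD p.1 0 * c.getD p.2 0 else 0) else 0)
      = (if u = (p.1 + p.2) % k then (if (i + u) % k = t then a.getD i 0 * b.getD p.1 0 * c.getD p.2 0 else 0) else 0) := by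
      intro u _
      by_cases h : u = (p.1 + p.2) % k
      · rw [if_pos h, if_pos h.symm]
      · rw [if_neg (fun hh => h hh.symm), if_neg h]
    rw [List.map_congr_left hflip,
        pv_sum_single k ((p.1 + p.2) % k)
          (fun u => if (i + u) % k = t then a.getD i 0 * b.getD p.1 0 * c.getD p.2 0 else 0)
          (Nat.mod_lt _ hk),
        Nat.add_mod_mod, ← Nat.add_assoc]
  rw [hL, hR]
  have hML : ∀ l ∈ List.range k,
      ((pvPairs k).map (fun p =>
        if (p.1 + p.2 + l) % k = t then a.getD p.1 0 * b.getD p.2 0 * c.getD l 0 else 0)).sum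
    = ((List.range k).map (fun i => ((List.range k).map (fun j =>
        if (i + j + l) % k = t then a.getD i 0 * b.getD j 0 * c.getD l 0 else 0)).sum)).sum := by
    intro l _
    unfold pvPairs
    rw [pv_sum_flat]
  have hMR : ∀ i ∈ List.range k,
      ((pvPairs k).map (fun p =>
        if (i + p.1 + p.2) % k = t then a.getD i 0 * b.getD p.1 0 * c.getD p.2 0 else 0)).sum
    = ((List.range k).map (fun j => ((List.range k).map (fun l =>
        if (i + j + l) % k = t then a.getD i 0 * b.getD j 0 * c.getD l 0 else 0)).sum)).sum := by
    intro i _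
    unfold pvPairs
    rw [pv_sum_flat]
  rw [List.map_congr_left hML, List.map_congr_left hMR, pv_sum_comm]
  apply congrArg List.sum
  apply List.map_congr_left
  intro i _
  rw [pv_sum_comm]

lemma pvSpec_assoc (k : Nat) (hk : 0 < k) (a b c : List Int) :
    pvSpec k (pvSpec k a b) c = pvSpec k a (pvSpec k b c) := by
  rw [pvSpec_eq_conv k (pvSpec k a b) c, pvSpec_eq_conv k a (pvSpec k b c)]
  apply List.map_congr_left
  intro t _
  calc pvConvE k (pvSpec k a b) c t % pvMOD
      = pvConvE k ((List.range k).map (pvConvE k a b)) c t % pvMOD := by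
        apply pvConvE_congr_left
        intro i hi
        rw [pvSpec_eq_conv, pv_getD_map_range k i _ hi, pv_getD_map_range k i _ hi,
            Int.emod_emod_of_dvd _ dvd_rfl]
    _ = pvConvE k a ((List.range k).map (pvConvE k b c)) t % pvMOD := by
        rw [pvConvE_assoc k hk a b c t]
    _ = pvConvE k a (pvSpec k b c) t % pvMOD := by
        apply pvConvE_congr_right
        intro i hi
        rw [pvSpec_eq_conv, pv_getD_map_range k i _ hi, pv_getD_map_range k i _ hi,
            Int.emod_emod_of_dvd _ dvd_rfl]

-- identity element
lemma pvSpec_id_right (k : Nat) (hk : 0 < k) (a : List Int) (hlen : a.length = k)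
    (hcanon : ∀ t, a.getD t 0 % pvMOD = a.getD t 0) :
    pvSpec k a ((pvZeros k).set 0 1) = a := by
  have h : ((pvZeros k).set 0 1).set 0 1 = (pvZeros k).set 0 1 := by
    rw [List.set_set]
  rw [← h]
  exact pv_spec_e0 a k hlen hk hcanon

lemma pvSpec_id_left (k : Nat) (hk : 0 < k) (a : List Int) (hlen : a.length = k)
    (hcanon : ∀ t, a.getD t 0 % pvMOD = a.getD t 0) :
    pvSpec k ((pvZeros k).set 0 1) a = a := by
  rw [pvSpec_comm]
  exact pvSpec_id_right k hk a hlen hcanon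

-- powers in the monoid
def pvPw (k : Nat) (a : List Int) : Nat → List Int
  | 0 => (pvZeros k).set 0 1
  | n + 1 => pvSpec k a (pvPw k a n)

lemma pvPw_length (k : Nat) (a : List Int) (n : Nat) : (pvPw k a n).length = k := by
  cases n with
  | zero => simp [pvPw, pvZeros]
  | succ n => simp [pvPw, pvSpec_length]

lemma pvPw_canon (k : Nat) (hk : 0 < k) (a : List Int) (n : Nat) :
    ∀ t, (pvPw k a n).getD t 0 % pvMOD = (pvPw k a n).getD t 0 := by
  cases n with
  | zero => exact pv_e0_canon k hk
  | succ n => exact pvSpec_canon k a (pvPw k a n)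

lemma pvPw_add (k : Nat) (hk : 0 < k) (a : List Int) (m n : Nat) :
    pvPw k a (m + n) = pvSpec k (pvPw k a m) (pvPw k a n) := by
  induction m with
  | zero =>
    rw [Nat.zero_add]
    show pvPw k a n = pvSpec k ((pvZeros k).set 0 1) (pvPw k a n)
    rw [pvSpec_id_left k hk _ (pvPw_length k a n) (pvPw_canon k hk a n)]
  | succ m ih =>
    have h : m + 1 + n = (m + n) + 1 := by omega
    rw [h]
    show pvSpec k a (pvPw k a (m + n)) = pvSpec k (pvSpec k a (pvPw k a m)) (pvPw k a n)
    rw [ih, pvSpec_assoc k hk]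

lemma pvPw_sq (k : Nat) (hk : 0 < k) (a : List Int) (n : Nat) :
    pvPw k (pvSpec k a a) n = pvPw k a (2 * n) := by
  induction n with
  | zero => rfl
  | succ n ih =>
    show pvSpec k (pvSpec k a a) (pvPw k (pvSpec k a a) n) = pvPw k a (2 * (n + 1))
    rw [ih, pvSpec_assoc k hk]
    have h1 : pvSpec k a (pvPw k a (2 * n)) = pvPw k a (2 * n + 1) := rfl
    have h2 : (2 : Nat) * (n + 1) = (2 * n + 1) + 1 := by omega
    rw [h1, h2]
    rfl

-- A's LSB-first power loop computes ret * dp^m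
lemma pv_powA (k : Nat) (hk : 0 < k) :
    ∀ (m : Nat) (ret dp : List Int), ret.length = k → dp.length = k →
      (∀ t, ret.getD t 0 % pvMOD = ret.getD t 0) →
      pvPowGoA ret dp m = pvSpec k ret (pvPw k dp m) := by
  intro m
  induction m using Nat.strong_induction_on with
  | _ m ih =>
    intro ret dp hr hd hc
    rw [pvPowGoA]
    by_cases hm : m = 0
    · rw [dif_pos hm, hm]
      exact (pvSpec_id_right k hk ret hr hc).symm
    · rw [dif_neg hm]
      have hmul : pvMulA dp dp = pvSpec k dp dp := by rw [pvMulA_eq_spec, hd]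
      have hrd : pvMulA ret dp = pvSpec k ret dp := by rw [pvMulA_eq_spec, hr]
      by_cases hodd : m % 2 = 1
      · rw [if_pos hodd]
        rw [ih (m / 2) (by omega) (pvMulA ret dp) (pvMulA dp dp)
            (by rw [hrd, pvSpec_length]) (by rw [hmul, pvSpec_length])
            (by rw [hrd]; exact pvSpec_canon k ret dp)]
        rw [hrd, hmul, pvPw_sq k hk, pvSpec_assoc k hk]
        have h1 : pvSpec k dp (pvPw k dp (2 * (m / 2))) = pvPw k dp (2 * (m / 2) + 1) := rfl
        rw [h1]
        have h2 : 2 * (m / 2) + 1 = m := by omega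
        rw [h2]
      · rw [if_neg hodd]
        rw [ih (m / 2) (by omega) ret (pvMulA dp dp) hr (by rw [hmul, pvSpec_length]) hc]
        rw [hmul, pvPw_sq k hk]
        have h2 : 2 * (m / 2) = m := by omega
        rw [h2]

-- a fold of multiplies, pulled out through associativity
lemma pv_foldl_pull {α : Type} (k : Nat) (hk : 0 < k) (F : α → List Int) (fs : List α) :
    ∀ (s t : List Int),
      fs.foldl (fun r x => pvSpec k r (F x)) (pvSpec k s t)
        = pvSpec k s (fs.foldl (fun r x => pvSpec k r (F x)) t) := by
  induction fs with
  | nil => intro s t; rfl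
  | cons f fs ih =>
    intro s t
    rw [List.foldl_cons, List.foldl_cons, pvSpec_assoc k hk, ih]

lemma pv_foldl_filter {α : Type} (p : α → Prop) [DecidablePred p] (f : List Int → α → List Int) :
    ∀ (l : List α) (g0 : List Int),
      l.foldl (fun g i => if p i then f g i else g) g0
        = (l.filter (fun i => decide (p i))).foldl f g0 := by
  intro l
  induction l with
  | nil => intro g0; rfl
  | cons x l ih =>
    intro g0
    rw [List.foldl_cons, List.filter_cons]
    by_cases h : p x
    · rw [if_pos h, if_pos (by simpa using h), List.foldl_cons, ih]
    · rw [if_neg h, if_neg (by simpa using h), ih]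

-- the product polynomial of the selected factors (a proof-side object; B never builds it)
def pvBuildP (k : Nat) (idxs : List Nat) : List Int :=
  idxs.foldl (fun g i => pvSpec k g (((pvZeros k).set 0 1).set i 1)) ((pvZeros k).set 0 1)

lemma pv_foldP_length (k : Nat) (idxs : List Nat) :
    ∀ g : List Int, g.length = k →
      (idxs.foldl (fun g i => pvSpec k g (((pvZeros k).set 0 1).set i 1)) g).length = k := by
  induction idxs with
  | nil => intro g hg; exact hg
  | cons x l ih =>
    intro g hg
    rw [List.foldl_cons]
    exact ih _ (pvSpec_length k g _)

lemma pvBuildP_length (k : Nat) (idxs : List Nat) : (pvBuildP k idxs).length = k := by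
  unfold pvBuildP
  exact pv_foldP_length k idxs _ (by rw [List.length_set, pvZeros_length])

-- B's shift-add pass is the fold of cyclic multiplies by the sparse factors
lemma pv_shiftAdds_foldl (k : Nat) (idxs : List Nat) (hidx : ∀ i ∈ idxs, 1 ≤ i ∧ i < k) :
    ∀ s : List Int, s.length = k →
      pvShiftAdds s idxs k
        = idxs.foldl (fun g i => pvSpec k g (((pvZeros k).set 0 1).set i 1)) s := by
  induction idxs with
  | nil => intro s _; rfl
  | cons x l ih =>
    intro s hs
    obtain ⟨hx1, hxk⟩ := hidx x (by simp)
    unfold pvShiftAdds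
    rw [List.foldl_cons, List.foldl_cons, ← pv_spec_mulList s k x hs hx1 hxk]
    exact ih (fun i hi => hidx i (List.mem_cons_of_mem _ hi)) _ (pvSpec_length k s _)

lemma pv_shiftAdds_mulP (k : Nat) (hk : 0 < k) (idxs : List Nat)
    (hidx : ∀ i ∈ idxs, 1 ≤ i ∧ i < k) (s : List Int) (hs : s.length = k)
    (hc : ∀ t, s.getD t 0 % pvMOD = s.getD t 0) :
    pvShiftAdds s idxs k = pvSpec k s (pvBuildP k idxs) := by
  rw [pv_shiftAdds_foldl k idxs hidx s hs]
  have h0 : s = pvSpec k s ((pvZeros k).set 0 1) := (pvSpec_id_right k hk s hs hc).symm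
  conv_lhs => rw [h0]
  exact pv_foldl_pull k hk (fun i => ((pvZeros k).set 0 1).set i 1) idxs s _

-- bin(m)[2:] read MSB-first evaluates back to m
lemma pv_bits_val (m : Nat) :
    (pvBitsGo m).foldl (fun n b => 2 * n + if b then 1 else 0) 0 = m := by
  induction m using Nat.strong_induction_on with
  | _ m ih =>
    by_cases hm : m = 0
    · rw [hm, pvBitsGo]; rfl
    · rw [pvBitsGo, dif_neg hm, List.foldl_append, ih (m / 2) (by omega)]
      show 2 * (m / 2) + (if decide (m % 2 = 1) then 1 else 0) = m
      by_cases h2 : m % 2 = 1 <;> simp [h2] <;> omega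

-- B's MSB-first loop computes P^m without ever building P
lemma pv_bfold (k : Nat) (hk : 0 < k) (idxs : List Nat)
    (hidx : ∀ i ∈ idxs, 1 ≤ i ∧ i < k) (bits : List Bool) :
    bits.foldl (fun ret bit =>
        let s := pvCycSq ret k
        if bit then pvShiftAdds s idxs k else s) ((pvZeros k).set 0 1)
      = pvPw k (pvBuildP k idxs) (bits.foldl (fun n b => 2 * n + if b then 1 else 0) 0) := by
  induction bits using List.reverseRecOn with
  | nil => rfl
  | append_singleton bs b ih =>
    rw [List.foldl_append, List.foldl_append, ih]
    simp only [List.foldl_cons, List.foldl_nil]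
    set v := bs.foldl (fun n b => 2 * n + if b then 1 else 0) 0 with hv
    have hsq : pvCycSq (pvPw k (pvBuildP k idxs) v) k
        = pvPw k (pvBuildP k idxs) (v + v) := by
      rw [pvCycSq_eq_spec, ← pvPw_add k hk]
    cases b with
    | false =>
      show pvCycSq (pvPw k (pvBuildP k idxs) v) k = pvPw k (pvBuildP k idxs) (2 * v + 0)
      rw [hsq]
      congr 1
      omega
    | true =>
      show pvShiftAdds (pvCycSq (pvPw k (pvBuildP k idxs) v) k) idxs k
          = pvPw k (pvBuildP k idxs) (2 * v + 1)
      rw [hsq,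
          pv_shiftAdds_mulP k hk idxs hidx _ (pvPw_length k _ _) (pvPw_canon k hk _ _),
          pvSpec_comm]
      have h1 : pvSpec k (pvBuildP k idxs) (pvPw k (pvBuildP k idxs) (v + v))
          = pvPw k (pvBuildP k idxs) ((v + v) + 1) := rfl
      rw [h1]
      congr 1
      omega

-- A's build phase: the pvMulA steps are pvSpec steps (all intermediate lists have length k)
lemma pv_buildA (rc : List Int) (k : Nat) :
    ∀ (l a : Nat) (g : List Int), g.length = k →
      (List.range' a l).foldl
          (fun gf i => if rc.getD i 0 ≠ 0 then pvMulA gf (((pvZeros k).set 0 1).set i 1) else gf) g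
        = (List.range' a l).foldl
            (fun gf i => if rc.getD i 0 ≠ 0 then pvSpec k gf (((pvZeros k).set 0 1).set i 1) else gf) g := by
  intro l
  induction l with
  | zero => intro a g _; rfl
  | succ l ih =>
    intro a g hg
    rw [List.range'_succ, List.foldl_cons, List.foldl_cons]
    by_cases h : rc.getD a 0 ≠ 0
    · rw [if_pos h, if_pos h, pvMulA_eq_spec, hg]
      exact ih (a + 1) _ (pvSpec_length k g _)
    · rw [if_neg h, if_neg h]
      exact ih (a + 1) _ hg

-- A's build phase: the residue mutation never changes the branch taken
lemma pv_phase1 (rcOrig : List Int) (mnz : Int) (k : Nat) :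
    ∀ (l : Nat), ∀ (a : Nat), 1 ≤ a →
    ∀ (rc gf : List Int),
      (∀ j, a ≤ j → rc.getD j 0 = rcOrig.getD j 0) →
      ((List.range' a l).foldl
          (fun (st : List Int × List Int) i =>
            if st.1.getD i 0 = 0 then st
            else (st.1.set i (st.1.getD i 0 - mnz), pvMulA st.2 (((pvZeros k).set 0 1).set i 1)))
          (rc, gf)).2
        = (List.range' a l).foldl
            (fun gf i =>
              if rcOrig.getD i 0 ≠ 0 then pvMulA gf (((pvZeros k).set 0 1).set i 1) else gf) gf := by
  intro l
  induction l with
  | zero => intro a _ rc gf _; rfl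
  | succ l ih =>
    intro a ha1 rc gf hagree
    rw [List.range'_succ, List.foldl_cons, List.foldl_cons]
    have hval : rc.getD a 0 = rcOrig.getD a 0 := hagree a (le_refl a)
    by_cases h0 : rcOrig.getD a 0 = 0
    · rw [if_pos (by rw [hval]; exact h0), if_neg (by simpa using h0)]
      exact ih (a + 1) (by omega) rc gf (fun j hj => hagree j (by omega))
    · rw [if_neg (by rw [hval]; exact h0), if_pos (by simpa using h0)]
      refine ih (a + 1) (by omega) (rc.set a (rc.getD a 0 - mnz)) _ ?_
      intro j hj
      by_cases hja : a < rc.length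
      · rw [pv_getD_set rc a j _ hja, if_neg (by omega)]
        exact hagree j (by omega)
      · rw [List.set_eq_of_length_le (by omega)]
        exact hagree j (by omega)

-- ===== VERDICT (by name: the statement is the Claim_ definition above) =====
theorem generating_function_spec : Claim_equal_generating_function := by
  unfold Claim_equal_generating_function
  intro rc hdom hpre
  unfold Spec_generating_function
  obtain ⟨r, hr, hrpos⟩ := hpre
  have hne : rc.filter (fun x => decide ((0:Int) < x)) ≠ [] := by
    intro h
    have := List.filter_eq_nil_iff.mp h r hr
    simp [hrpos] at this
  obtain ⟨m, hm⟩ : ∃ m, PySem.List.min? (rc.filter (fun x => decide ((0:Int) < x))) (fun x => x) = some m := by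
    cases hfe : rc.filter (fun x => decide ((0:Int) < x)) with
    | nil => exact absurd hfe hne
    | cons x tl => exact ⟨tl.foldl min x, by rw [PySem.List.min?_id_cons]⟩
  have hk : 0 < rc.length := by
    cases rc with
    | nil => simp at hr
    | cons x xs => simp
  unfold generating_function generating_function_alt
  simp only [hm]
  have hidx : ∀ i ∈ (List.range' 1 (rc.length - 1)).filter (fun i => decide (rc.getD i 0 ≠ 0)),
      1 ≤ i ∧ i < rc.length := by
    intro i hi
    have h1 := (List.mem_filter.mp hi).1
    have h2 := List.mem_range'_1.mp h1
    omega
  have he0len : ((pvZeros rc.length).set 0 1).length = rc.length := by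
    rw [List.length_set, pvZeros_length]
  have hrange : List.range rc.length = 0 :: List.range' 1 (rc.length - 1) := by
    obtain ⟨n, hn⟩ : ∃ n, rc.length = n + 1 := ⟨rc.length - 1, by omega⟩
    rw [hn, List.range_eq_range', List.range'_succ]
    norm_num
  have hid : pvMulA ((pvZeros rc.length).set 0 1) (((pvZeros rc.length).set 0 1).set 0 1)
      = (pvZeros rc.length).set 0 1 := by
    rw [pvMulA_eq_spec, he0len]
    exact pv_spec_e0 _ _ he0len hk (pv_e0_canon _ hk)
  -- name the index list and the product polynomial
  set idxs := (List.range' 1 (rc.length - 1)).filter (fun i => decide (rc.getD i 0 ≠ 0)) with hidxs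
  -- A's built polynomial is pvBuildP
  have hchain : ∀ rc' : List Int, (∀ j, 1 ≤ j → rc'.getD j 0 = rc.getD j 0) →
      ((List.range' 1 (rc.length - 1)).foldl
        (fun (st : List Int × List Int) i =>
          if st.1.getD i 0 = 0 then st
          else (st.1.set i (st.1.getD i 0 - m), pvMulA st.2 (((pvZeros rc.length).set 0 1).set i 1)))
        (rc', (pvZeros rc.length).set 0 1)).2 = pvBuildP rc.length idxs := by
    intro rc' hag
    rw [pv_phase1 rc m rc.length (rc.length - 1) 1 (le_refl 1) rc' _ hag,
        pv_buildA rc rc.length (rc.length - 1) 1 _ he0len,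
        pv_foldl_filter (fun i => rc.getD i 0 ≠ 0)
          (fun gf i => pvSpec rc.length gf (((pvZeros rc.length).set 0 1).set i 1))
          (List.range' 1 (rc.length - 1)) ((pvZeros rc.length).set 0 1)]
    rfl
  -- A side reduces to pvPw
  have hA : pvPowGoA ((pvZeros rc.length).set 0 1)
      (((List.range rc.length).foldl
        (fun (st : List Int × List Int) i =>
          if st.1.getD i 0 = 0 then st
          else (st.1.set i (st.1.getD i 0 - m), pvMulA st.2 (((pvZeros rc.length).set 0 1).set i 1)))
        (rc, (pvZeros rc.length).set 0 1)).2) m.toNat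
      = pvPw rc.length (pvBuildP rc.length idxs) m.toNat := by
    have hbuilt : ((List.range rc.length).foldl
        (fun (st : List Int × List Int) i =>
          if st.1.getD i 0 = 0 then st
          else (st.1.set i (st.1.getD i 0 - m), pvMulA st.2 (((pvZeros rc.length).set 0 1).set i 1)))
        (rc, (pvZeros rc.length).set 0 1)).2 = pvBuildP rc.length idxs := by
      rw [hrange, List.foldl_cons]
      by_cases h0 : rc.getD 0 0 = 0
      · rw [if_pos h0]
        exact hchain rc (fun j _ => rfl)
      · rw [if_neg h0, hid]
        refine hchain _ ?_
        intro j hj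
        rw [pv_getD_set rc 0 j _ hk, if_neg (by omega)]
    rw [hbuilt,
        pv_powA rc.length hk m.toNat _ _ he0len (pvBuildP_length rc.length idxs) (pv_e0_canon _ hk),
        pvSpec_id_left rc.length hk _ (pvPw_length _ _ _) (pvPw_canon _ hk _ _)]
  rw [hA]
  -- B side
  rw [show (1 : Int) :: pvZeros (rc.length - 1) = (pvZeros rc.length).set 0 1 from
    (pv_e0_cons _ hk).symm]
  rw [pv_bfold rc.length hk idxs hidx (pvBits m.toNat)]
  congr 1
  by_cases hm0 : m.toNat = 0
  · rw [hm0]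
    rfl
  · rw [pvBits, if_neg hm0, pv_bits_val]
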